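-- pv_equiv track=rewrite | github.com/hyroai/lint | lint/uuid_quality.py | _has_sequential_run
-- ===== SOURCE A (Python) =====
-- def _has_sequential_run(
--     nibbles: list[int], min_run: int, allowed_steps: set[int]
-- ) -> bool:
--     """Detect an arithmetic run of *min_run* nibbles whose step is in *allowed_steps*."""
--     for start in range(len(nibbles) - min_run + 1):
--         window = nibbles[start : start + min_run]
--         diffs = {(window[i + 1] - window[i]) % 16 for i in range(len(window) - 1)}
--         if len(diffs) == 1 and next(iter(diffs)) in allowed_steps:
--             return True
--     return False
-- ===== SOURCE B (Python) =====
-- def _has_sequential_run(nibbles, min_run, allowed_steps):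
--     """Single pass over consecutive diffs, tracking the current equal-diff run length."""
--     if min_run < 2:
--         return False
--     need = min_run - 1
--     prev = None
--     run = 0
--     for a, b in zip(nibbles, nibbles[1:]):
--         d = (b - a) % 16
--         run = run + 1 if d == prev else 1
--         prev = d
--         if run >= need and d in allowed_steps:
--             return True
--     return False
-- ===== Notes on version B (the rewrite author's own statement) =====
-- stated objective: faster
-- what changed: Instead of re-slicing a window of min_run nibbles at every start position and building a set of its diffs (O(n*min_run)), B makes one pass over the n-1 consecutive diffs mod 16, tracking the length of the current equal-diff run and reporting success as soon as a run of min_run-1 equal allowed diffs is seen.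
-- outside the precondition, e.g. on _has_sequential_run([12, 7, 13, 4], -2, {8, 6}): A returns True, B returns False
import Mathlib
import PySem

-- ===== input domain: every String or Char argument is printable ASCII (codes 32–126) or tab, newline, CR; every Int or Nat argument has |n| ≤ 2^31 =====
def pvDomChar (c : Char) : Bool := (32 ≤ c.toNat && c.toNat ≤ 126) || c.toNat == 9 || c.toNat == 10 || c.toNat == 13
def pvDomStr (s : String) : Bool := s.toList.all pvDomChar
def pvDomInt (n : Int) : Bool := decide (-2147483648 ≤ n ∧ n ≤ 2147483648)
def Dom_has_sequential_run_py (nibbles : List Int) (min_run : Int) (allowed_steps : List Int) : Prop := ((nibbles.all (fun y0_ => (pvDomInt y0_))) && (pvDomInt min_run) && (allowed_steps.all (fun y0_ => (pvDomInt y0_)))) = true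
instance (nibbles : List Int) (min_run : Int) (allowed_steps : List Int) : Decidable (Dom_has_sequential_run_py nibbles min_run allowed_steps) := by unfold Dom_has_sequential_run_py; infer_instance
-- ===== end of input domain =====

-- B replaces A's window-by-window scan with one pass over the consecutive diffs tracking the
-- current equal-diff run length (objective: faster; a timing run measures the speed-up).


-- ===== PORT A =====
-- A-side helper: the list produced by the set comprehension
-- `{(window[i + 1] - window[i]) % 16 for i in range(len(window) - 1)}` in generation order
-- (both indices are always in range there, so pyGetD with default 0 is exact).
def aDiffList (window : List Int) : List Int :=
  (PySem.List.pyRange 0 ((window.length : Int) - 1) 1).map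
    (fun i => PySem.Int.mod (PySem.List.pyGetD window (i + 1) 0 - PySem.List.pyGetD window i 0) 16)

-- `len(diffs) == 1 and next(iter(diffs)) in allowed_steps`: under the length-1 guard
-- `next(iter(diffs))` is the set's unique element, i.e. its head.
def has_sequential_run_py (nibbles : List Int) (min_run : Int) (allowed_steps : List Int) : Bool :=
  (PySem.List.pyRange 0 ((nibbles.length : Int) - min_run + 1) 1).any (fun start =>
    let window := PySem.List.slice nibbles (some start) (some (start + min_run))
    let diffs : PySem.Set Int := PySem.Set.ofList (aDiffList window)
    (diffs.length == 1) && allowed_steps.contains (diffs.headD 0))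

-- ===== PORT B =====
-- B-side helper: B's `for a, b in zip(...)` loop with its early `return True`.
def bLoop (need : Int) (allowed_steps : List Int) : Option Int → Int → List Int → Bool
  | _, _, [] => false
  | prev, run, d :: rest =>
    let run' := if prev = some d then run + 1 else 1
    if decide (need ≤ run') && allowed_steps.contains d then true
    else bLoop need allowed_steps (some d) run' rest

def has_sequential_run_py_alt (nibbles : List Int) (min_run : Int) (allowed_steps : List Int) : Bool :=
  if min_run < 2 then false
  else
    bLoop (min_run - 1) allowed_steps none 0
      ((List.zip nibbles (PySem.List.slice nibbles (some 1) none)).map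
        (fun p => PySem.Int.mod (p.2 - p.1) 16))

-- ===== PRECONDITION & SPEC =====
-- Pre_ excludes negative min_run (a negative run length, outside the natural domain): there A's
-- slice stop index `start + min_run` wraps around Python-style, so A scans accidental windows of
-- unrelated lengths; B simply reports that no run of such a length exists.
def Pre_has_sequential_run_py (nibbles : List Int) (min_run : Int) (allowed_steps : List Int) : Prop :=
  0 ≤ min_run
instance (nibbles : List Int) (min_run : Int) (allowed_steps : List Int) : Decidable (Pre_has_sequential_run_py nibbles min_run allowed_steps) := by unfold Pre_has_sequential_run_py; infer_instance

def pvWitness_has_sequential_run_py : List Int × Int × List Int := ([0, 3, 6, 9], 3, [3])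

def Spec_has_sequential_run_py (nibbles : List Int) (min_run : Int) (allowed_steps : List Int) (out : Bool) : Prop := out = has_sequential_run_py_alt nibbles min_run allowed_steps
instance (nibbles : List Int) (min_run : Int) (allowed_steps : List Int) (out : Bool) : Decidable (Spec_has_sequential_run_py nibbles min_run allowed_steps out) := by unfold Spec_has_sequential_run_py; infer_instance

-- ===== CLAIM (what is proved, stated in full; the proofs are below) =====
def Claim_equal_has_sequential_run_py : Prop := ∀ (nibbles : List Int) (min_run : Int) (allowed_steps : List Int), Dom_has_sequential_run_py nibbles min_run allowed_steps → Pre_has_sequential_run_py nibbles min_run allowed_steps → Spec_has_sequential_run_py nibbles min_run allowed_steps (has_sequential_run_py nibbles min_run allowed_steps)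

-- ===== LEMMAS AND PROOFS =====

-- The consecutive-diff list of `nibbles`, exactly as B's port builds it (after `nibbles[1:]` = tail).
def pvDs (nibbles : List Int) : List Int :=
  (List.zip nibbles nibbles.tail).map (fun p => PySem.Int.mod (p.2 - p.1) 16)

-- Common specification both ports are reduced to: some length-N segment of the diff list is
-- constant with an allowed value.
def SegSpec (N : Nat) (allowed : List Int) (ds : List Int) : Prop :=
  ∃ s v, (ds.drop s).take N = List.replicate N v ∧ v ∈ allowed

lemma pvDs_length (nibbles : List Int) : (pvDs nibbles).length = nibbles.length - 1 := by
  simp [pvDs, List.length_zip, List.length_tail]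

lemma pvDs_getElem (nibbles : List Int) (i : Nat) (h : i < nibbles.length - 1) :
    (pvDs nibbles)[i]'(by rw [pvDs_length]; omega) =
      PySem.Int.mod ((nibbles[i + 1]'(by omega)) - (nibbles[i]'(by omega))) 16 := by
  simp [pvDs, List.getElem_zip, List.getElem_tail]

lemma take_eq_replicate_cons (d : Int) (rest : List Int) (k : Nat) (v : Int) :
    (d :: rest).take (k + 1) = List.replicate (k + 1) v ↔
      d = v ∧ rest.take k = List.replicate k v := by
  simp [List.replicate_succ]

lemma take_replicate_mono (rest : List Int) (k j : Nat) (v : Int) (h : rest.take k = List.replicate k v)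
    (hj : j ≤ k) : rest.take j = List.replicate j v := by
  have : rest.take j = (rest.take k).take j := by rw [List.take_take, Nat.min_eq_left hj]
  rw [this, h, List.take_replicate, Nat.min_eq_left hj]

lemma SegSpec_cons (N : Nat) (allowed : List Int) (d : Int) (rest : List Int) :
    SegSpec N allowed (d :: rest) ↔
      (∃ v, (d :: rest).take N = List.replicate N v ∧ v ∈ allowed) ∨ SegSpec N allowed rest := by
  constructor
  · rintro ⟨s, v, hseg, hv⟩
    cases s with
    | zero => exact Or.inl ⟨v, by simpa using hseg, hv⟩
    | succ s' => exact Or.inr ⟨s', v, by simpa using hseg, hv⟩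
  · rintro (⟨v, hseg, hv⟩ | ⟨s, v, hseg, hv⟩)
    · exact ⟨0, v, by simpa using hseg, hv⟩
    · exact ⟨s + 1, v, by simpa using hseg, hv⟩

lemma bLoop_iff (N : Nat) (hN : 1 ≤ N) (allowed : List Int) :
    ∀ (ds : List Int) (prev : Option Int) (run : Int), 0 ≤ run →
      (bLoop (N : Int) allowed prev run ds = true ↔
        SegSpec N allowed ds ∨
          ∃ v k, prev = some v ∧ v ∈ allowed ∧ 1 ≤ k ∧
            ds.take k = List.replicate k v ∧ (N : Int) ≤ run + k) := by
  intro ds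
  induction ds with
  | nil =>
    intro prev run _
    simp only [bLoop]
    constructor
    · intro h; cases h
    · rintro (⟨s, v, hseg, hv⟩ | ⟨v, k, hprev, hv, hk, htake, hle⟩)
      · exfalso; have := congrArg List.length hseg; simp at this; omega
      · exfalso; have := congrArg List.length htake; simp at this; omega
  | cons d rest ih =>
    intro prev run hrun
    have hcontains : allowed.contains d = true ↔ d ∈ allowed := by
      simp
    have hrun' : (0:Int) ≤ if prev = some d then run + 1 else 1 := by split <;> omega
    have hrunge : (1:Int) ≤ if prev = some d then run + 1 else 1 := by split <;> omega
    rw [show bLoop (N : Int) allowed prev run (d :: rest) =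
        (if decide ((N:Int) ≤ (if prev = some d then run + 1 else 1)) && allowed.contains d then true
         else bLoop (N:Int) allowed (some d) (if prev = some d then run + 1 else 1) rest) from rfl]
    rw [SegSpec_cons]
    set run' : Int := if prev = some d then run + 1 else 1 with hrdef
    by_cases hcond : (decide ((N:Int) ≤ run') && allowed.contains d) = true
    · simp only [hcond, if_pos]
      obtain ⟨hle, hv⟩ := Bool.and_eq_true_iff.mp hcond
      have hle : (N:Int) ≤ run' := of_decide_eq_true hle
      have hv : d ∈ allowed := hcontains.mp hv
      constructor
      · intro _
        by_cases hp : prev = some d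
        · refine Or.inr ⟨d, 1, hp, hv, le_refl 1, by simp, ?_⟩
          have : run' = run + 1 := by rw [hrdef, if_pos hp]
          push_cast; omega
        · have h1 : run' = 1 := by rw [hrdef, if_neg hp]
          have hN1 : N = 1 := by omega
          refine Or.inl (Or.inl ⟨d, ?_, hv⟩)
          simp [hN1]
      · intro _; trivial
    · simp only [hcond, Bool.false_eq_true, if_false]
      rw [ih (some d) run' hrun']
      have himm : ¬ ((N:Int) ≤ run' ∧ d ∈ allowed) := by
        intro ⟨h1, h2⟩
        exact hcond (by simp [h1]; exact h2)
      constructor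
      · rintro (hseg | ⟨v, k, hvd, hv, hk, htake, hle⟩)
        · exact Or.inl (Or.inr hseg)
        · obtain rfl : d = v := by injection hvd
          by_cases hp : prev = some d
          · refine Or.inr ⟨d, k + 1, hp, hv, by omega, ?_, ?_⟩
            · exact (take_eq_replicate_cons d rest k d).mpr ⟨rfl, htake⟩
            · have : run' = run + 1 := by rw [hrdef, if_pos hp]
              push_cast at hle ⊢; omega
          · have h1 : run' = 1 := by rw [hrdef, if_neg hp]
            have hkN : N - 1 ≤ k := by omega
            refine Or.inl (Or.inl ⟨d, ?_, hv⟩)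
            obtain ⟨N', rfl⟩ : ∃ N', N = N' + 1 := ⟨N - 1, by omega⟩
            exact (take_eq_replicate_cons d rest N' d).mpr
              ⟨rfl, take_replicate_mono rest k N' d htake (by omega)⟩
      · rintro ((⟨v, hseg, hv⟩ | hseg) | ⟨v, k, hprev, hv, hk, htake, hle⟩)
        · obtain ⟨N', rfl⟩ : ∃ N', N = N' + 1 := ⟨N - 1, by omega⟩
          obtain ⟨rfl, htail⟩ := (take_eq_replicate_cons d rest N' v).mp hseg
          rcases Nat.eq_zero_or_pos N' with hN' | hN'
          · exact absurd ⟨by subst hN'; push_cast; omega, hv⟩ himm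
          · refine Or.inr ⟨d, N', rfl, hv, by omega, htail, by push_cast; omega⟩
        · exact Or.inl hseg
        · obtain ⟨k', rfl⟩ : ∃ k', k = k' + 1 := ⟨k - 1, by omega⟩
          obtain ⟨rfl, htail⟩ := (take_eq_replicate_cons d rest k' v).mp htake
          have hp : prev = some d := hprev
          have h1 : run' = run + 1 := by rw [hrdef, if_pos hp]
          rcases Nat.eq_zero_or_pos k' with hk' | hk'
          · exact absurd ⟨by subst hk'; push_cast at hle; omega, hv⟩ himm
          · refine Or.inr ⟨d, k', rfl, hv, by omega, htail, by push_cast at hle ⊢; omega⟩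

lemma foldl_add_const (v : Int) : ∀ (t : List Int), (∀ x ∈ t, x = v) →
    List.foldl PySem.Set.add [v] t = [v] := by
  intro t
  induction t with
  | nil => intro _; rfl
  | cons y t ih =>
    intro h
    have hy : y = v := h y (by simp)
    subst hy
    have : PySem.Set.add [y] y = [y] := by simp [PySem.Set.add, PySem.Set.contains]
    rw [List.foldl_cons, this]
    exact ih (fun x hx => h x (by simp [hx]))

lemma ofList_const (l : List Int) (v : Int) (hne : l ≠ []) (h : ∀ x ∈ l, x = v) :
    PySem.Set.ofList l = [v] := by
  obtain ⟨x, t, rfl⟩ := List.exists_cons_of_ne_nil hne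
  have hx : x = v := h x (by simp)
  subst hx
  rw [PySem.Set.ofList_eq_foldl]
  rw [List.foldl_cons]
  have : PySem.Set.add [] x = [x] := by simp [PySem.Set.add, PySem.Set.contains]
  rw [this]
  exact foldl_add_const x t (fun y hy => h y (by simp [hy]) ▸ rfl)

lemma check_iff (l allowed : List Int) :
    (((PySem.Set.ofList l).length == 1) && allowed.contains ((PySem.Set.ofList l).headD 0)) = true ↔
      ∃ v, l ≠ [] ∧ (∀ x ∈ l, x = v) ∧ v ∈ allowed := by
  constructor
  · intro h
    obtain ⟨h1, h2⟩ := Bool.and_eq_true_iff.mp h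
    obtain ⟨a, ha⟩ := List.length_eq_one_iff.mp (by simpa using h1)
    refine ⟨a, ?_, ?_, ?_⟩
    · rintro rfl
      simp [PySem.Set.ofList] at ha
    · intro x hx
      have : x ∈ PySem.Set.ofList l := (PySem.Set.mem_ofList _ _).mpr hx
      rw [ha] at this
      simpa using this
    · rw [ha] at h2
      simpa using h2
  · rintro ⟨v, hne, hconst, hv⟩
    rw [ofList_const l v hne hconst]
    simp [hv]

lemma aDiffList_length (w : List Int) : (aDiffList w).length = w.length - 1 := by
  simp [aDiffList, PySem.List.length_pyRange_one]

lemma aDiffList_getElem (w : List Int) (i : Nat) (h : i < w.length - 1) :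
    (aDiffList w)[i]'(by rw [aDiffList_length]; omega) =
      PySem.Int.mod ((w[i + 1]'(by omega)) - (w[i]'(by omega))) 16 := by
  simp only [aDiffList, List.getElem_map, PySem.List.getElem_pyRange_one, zero_add]
  have h1 : PySem.List.pyGetD w ((i : Int) + 1) 0 = w[i + 1]'(by omega) := by
    rw [show ((i : Int) + 1) = ((i + 1 : Nat) : Int) by push_cast; ring]
    rw [PySem.List.pyGetD_natCast]
    exact List.getD_eq_getElem w 0 (by omega)
  have h2 : PySem.List.pyGetD w ((i : Int)) 0 = w[i]'(by omega) := by
    rw [PySem.List.pyGetD_natCast]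
    exact List.getD_eq_getElem w 0 (by omega)
  rw [h1, h2]

lemma aDiffList_window (nibbles : List Int) (M s : Nat) (hM : 2 ≤ M) (hs : s + M ≤ nibbles.length) :
    aDiffList ((nibbles.drop s).take M) = ((pvDs nibbles).drop s).take (M - 1) := by
  have hwl : ((nibbles.drop s).take M).length = M := by
    simp [List.length_take, List.length_drop]; omega
  have hdl : (pvDs nibbles).length = nibbles.length - 1 := pvDs_length nibbles
  apply List.ext_getElem
  · rw [aDiffList_length, hwl]
    simp [List.length_take, List.length_drop, hdl]
    omega
  · intro i h1 h2
    rw [aDiffList_length, hwl] at h1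
    have hw : ∀ (j : Nat) (hj : j < M), ((nibbles.drop s).take M)[j]'(by omega) =
        nibbles[s + j]'(by omega) := by
      intro j hj
      rw [List.getElem_take, List.getElem_drop]
    rw [aDiffList_getElem _ i (by rw [hwl]; omega)]
    rw [hw (i + 1) (by omega), hw i (by omega)]
    rw [List.getElem_take, List.getElem_drop]
    rw [pvDs_getElem nibbles (s + i) (by omega)]
    congr 2

lemma window_eq (nibbles : List Int) (m : Int) (hm0 : 0 ≤ m) (s : Nat) :
    PySem.List.slice nibbles (some (s : Int)) (some ((s : Int) + m)) =
      (nibbles.drop s).take m.toNat := by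
  rw [PySem.List.slice_toNat nibbles (by omega) (by omega)]
  have h1 : ((s : Int)).toNat = s := Int.toNat_natCast s
  have h2 : (((s : Int)) + m).toNat = s + m.toNat := by omega
  rw [h1, h2]
  congr 1
  omega

lemma aCheck_iff (nibbles : List Int) (m : Int) (hm : 2 ≤ m) (allowed : List Int) (s : Nat)
    (hs : s + m.toNat ≤ nibbles.length) :
    (((PySem.Set.ofList (aDiffList (PySem.List.slice nibbles (some (s : Int)) (some ((s : Int) + m))))).length == 1)
      && allowed.contains ((PySem.Set.ofList (aDiffList (PySem.List.slice nibbles (some (s : Int)) (some ((s : Int) + m))))).headD 0)) = true ↔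
    ∃ v, ((pvDs nibbles).drop s).take (m.toNat - 1) = List.replicate (m.toNat - 1) v ∧ v ∈ allowed := by
  rw [window_eq nibbles m (by omega) s]
  rw [aDiffList_window nibbles m.toNat s (by omega) hs]
  rw [check_iff]
  have hlen : (((pvDs nibbles).drop s).take (m.toNat - 1)).length = m.toNat - 1 := by
    simp [List.length_take, List.length_drop, pvDs_length]
    omega
  constructor
  · rintro ⟨v, _, hconst, hv⟩
    exact ⟨v, List.eq_replicate_iff.mpr ⟨hlen, hconst⟩, hv⟩
  · rintro ⟨v, hrep, hv⟩
    refine ⟨v, ?_, (List.eq_replicate_iff.mp hrep).2, hv⟩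
    intro hnil
    rw [hnil] at hlen
    simp at hlen
    omega

lemma portA_iff (nibbles : List Int) (m : Int) (hm : 2 ≤ m) (allowed : List Int) :
    has_sequential_run_py nibbles m allowed = true ↔
      SegSpec (m.toNat - 1) allowed (pvDs nibbles) := by
  simp only [has_sequential_run_py, List.any_eq_true]
  constructor
  · rintro ⟨start, hmem, hchk⟩
    obtain ⟨h0, h1⟩ := (PySem.List.mem_pyRange_one).mp hmem
    have hstart : ((start.toNat : Nat) : Int) = start := Int.toNat_of_nonneg h0
    rw [← hstart] at hchk
    have hs : start.toNat + m.toNat ≤ nibbles.length := by omega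
    obtain ⟨v, hseg, hv⟩ := (aCheck_iff nibbles m hm allowed start.toNat hs).mp hchk
    exact ⟨start.toNat, v, hseg, hv⟩
  · rintro ⟨s, v, hseg, hv⟩
    have hlen := congrArg List.length hseg
    simp [List.length_take, List.length_drop, pvDs_length] at hlen
    have hs : s + m.toNat ≤ nibbles.length := by omega
    refine ⟨(s : Int), (PySem.List.mem_pyRange_one).mpr ⟨by omega, by omega⟩, ?_⟩
    exact (aCheck_iff nibbles m hm allowed s hs).mpr ⟨v, hseg, hv⟩

lemma portA_small (nibbles : List Int) (m : Int) (h0 : 0 ≤ m) (h2 : m < 2) (allowed : List Int) :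
    has_sequential_run_py nibbles m allowed = false := by
  simp only [has_sequential_run_py, List.any_eq_false]
  intro start hmem
  obtain ⟨hs0, _⟩ := (PySem.List.mem_pyRange_one).mp hmem
  have hstart : ((start.toNat : Nat) : Int) = start := Int.toNat_of_nonneg hs0
  rw [← hstart, window_eq nibbles m h0 start.toNat]
  have hwin : (aDiffList ((nibbles.drop start.toNat).take m.toNat)) = [] := by
    apply List.eq_nil_of_length_eq_zero
    rw [aDiffList_length]
    have : ((nibbles.drop start.toNat).take m.toNat).length ≤ m.toNat := by
      simp [List.length_take]
    omega
  rw [hwin]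
  simp [PySem.Set.ofList]


-- ===== VERDICT (by name: the statement is the Claim_ definition above) =====
theorem has_sequential_run_py_spec : Claim_equal_has_sequential_run_py := by
  intro nibbles m allowed _ hpre
  unfold Spec_has_sequential_run_py has_sequential_run_py_alt
  unfold Pre_has_sequential_run_py at hpre
  by_cases hm : m < 2
  · rw [if_pos hm]
    exact portA_small nibbles m hpre hm allowed
  · rw [if_neg hm]
    have hm2 : 2 ≤ m := by omega
    rw [PySem.List.slice_from_one]
    have hds : (List.zip nibbles nibbles.tail).map (fun p => PySem.Int.mod (p.2 - p.1) 16) =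
        pvDs nibbles := rfl
    rw [hds]
    rw [Bool.eq_iff_iff]
    rw [portA_iff nibbles m hm2 allowed]
    rw [show m - 1 = (((m.toNat - 1 : Nat)) : Int) by omega]
    rw [bLoop_iff (m.toNat - 1) (by omega) allowed (pvDs nibbles) none 0 (le_refl 0)]
    constructor
    · exact fun h => Or.inl h
    · rintro (h | ⟨v, k, hnone, _⟩)
      · exact h
      · cases hnone
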